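-- pv_equiv track=rewrite | github.com/freethinkingzen/SAT_Monopoles | monosat.py | buildCNF
-- ===== SOURCE A (Python) =====
-- def additiveProperty(x, y, z):
--   if(x + y == z):
--     return True
--   else:
--     return False
--
-- def L(monos, room, monopole):
--   return (monos * room) + monopole
--
-- def buildCNF(monos, rooms):
--   cnf = []
--
--   # 1) Each monopole is placed
--   for m in range(1, monos+1):
--     clause = ''
--     for r in range(rooms):
--       # Creates atom variable
--       clause += str(L(monos, r, m)) + ' '
--     clause += '0'
--     cnf.append(clause)
--
--   # 2) No monopole is in two places
--   for m in range(1, monos+1):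
--     clause = ''
--     for r in range(rooms):
--       # Creates negated atom variable
--       clause += '-' + str(L(monos, r, m)) + ' '
--     clause += '0'
--     cnf.append(clause)
--
--   # 3) Sums exclude monopoles s.t. X + Y = Z
--   for r in range(rooms):
--     for x in range(1, monos-1):
--       for y in range(x + 1, monos):
--         for z in range(y + 1, monos+1):
--           if(additiveProperty(x,y,z)):
--             cnf.append('-' + str(L(monos, r, x)) + ' -' +
--                              str(L(monos, r, y)) + ' -' +
--                              str(L(monos, r, z)) + ' 0')
--   return cnf
-- ===== SOURCE B (Python) =====
-- def buildCNF(monos, rooms):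
--     # 1) & 2): placed / not-in-two-places clauses, built by comprehension + join
--     placed = [''.join('%d ' % (monos * r + m) for r in range(rooms)) + '0'
--               for m in range(1, monos + 1)]
--     negated = [''.join('-%d ' % (monos * r + m) for r in range(rooms)) + '0'
--                for m in range(1, monos + 1)]
--     # 3): z = x + y directly (z > y holds automatically since x >= 1), no scan over z
--     sums = ['-%d -%d -%d 0' % (monos * r + x, monos * r + y, monos * r + (x + y))
--             for r in range(rooms)
--             for x in range(1, monos - 1)
--             for y in range(x + 1, monos)
--             if x + y <= monos]
--     return placed + negated + sums
-- ===== Notes on version B (the rewrite author's own statement) =====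
-- stated objective: faster
-- what changed: The innermost scan over all candidate z is removed: z = x + y is computed directly with a range check x + y <= monos, and the clause lists are built with comprehensions/join instead of accumulator loops.
import Mathlib
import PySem

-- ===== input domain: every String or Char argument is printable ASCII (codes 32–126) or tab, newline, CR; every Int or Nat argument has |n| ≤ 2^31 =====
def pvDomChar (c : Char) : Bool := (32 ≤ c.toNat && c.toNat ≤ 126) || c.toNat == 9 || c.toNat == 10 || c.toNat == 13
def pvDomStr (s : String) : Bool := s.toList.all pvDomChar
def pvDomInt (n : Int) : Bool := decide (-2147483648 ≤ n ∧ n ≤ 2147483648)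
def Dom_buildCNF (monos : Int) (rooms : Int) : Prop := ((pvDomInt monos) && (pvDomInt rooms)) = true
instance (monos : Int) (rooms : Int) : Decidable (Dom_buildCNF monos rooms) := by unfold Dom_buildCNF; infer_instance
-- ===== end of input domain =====

-- B removes A's innermost scan over z by computing z = x + y directly with a range
-- check (objective: faster, the z loop disappears).

-- ===== PORT A =====
def additiveProperty (x y z : Int) : Bool :=
  if x + y == z then true else false

def pyL (monos room monopole : Int) : Int := (monos * room) + monopole

def buildCNF (monos : Int) (rooms : Int) : List String :=
  let cnf : List String := []
  -- 1) Each monopole is placed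
  let cnf := (PySem.List.pyRange 1 (monos+1) 1).foldl (fun cnf m =>
      let clause := (PySem.List.pyRange 0 rooms 1).foldl
        (fun clause r => clause ++ (PySem.Int.toStr (pyL monos r m) ++ " ")) ""
      cnf ++ [clause ++ "0"]) cnf
  -- 2) No monopole is in two places
  let cnf := (PySem.List.pyRange 1 (monos+1) 1).foldl (fun cnf m =>
      let clause := (PySem.List.pyRange 0 rooms 1).foldl
        (fun clause r => clause ++ ("-" ++ PySem.Int.toStr (pyL monos r m) ++ " ")) ""
      cnf ++ [clause ++ "0"]) cnf
  -- 3) Sums exclude monopoles s.t. X + Y = Z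
  (PySem.List.pyRange 0 rooms 1).foldl (fun cnf r =>
    (PySem.List.pyRange 1 (monos-1) 1).foldl (fun cnf x =>
      (PySem.List.pyRange (x+1) monos 1).foldl (fun cnf y =>
        (PySem.List.pyRange (y+1) (monos+1) 1).foldl (fun cnf z =>
          if additiveProperty x y z then
            cnf ++ ["-" ++ PySem.Int.toStr (pyL monos r x) ++ " -" ++
                    PySem.Int.toStr (pyL monos r y) ++ " -" ++
                    PySem.Int.toStr (pyL monos r z) ++ " 0"]
          else cnf) cnf) cnf) cnf) cnf

-- ===== PORT B =====
def buildCNF_alt (monos : Int) (rooms : Int) : List String :=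
  let placed := (PySem.List.pyRange 1 (monos+1) 1).map (fun m =>
      String.join ((PySem.List.pyRange 0 rooms 1).map
        (fun r => PySem.Int.toStr ((monos * r) + m) ++ " ")) ++ "0")
  let negated := (PySem.List.pyRange 1 (monos+1) 1).map (fun m =>
      String.join ((PySem.List.pyRange 0 rooms 1).map
        (fun r => "-" ++ PySem.Int.toStr ((monos * r) + m) ++ " ")) ++ "0")
  let sums := (PySem.List.pyRange 0 rooms 1).flatMap (fun r =>
      (PySem.List.pyRange 1 (monos-1) 1).flatMap (fun x =>
        ((PySem.List.pyRange (x+1) monos 1).filter (fun y => decide (x + y ≤ monos))).map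
          (fun y =>
            "-" ++ PySem.Int.toStr ((monos * r) + x) ++ " -" ++
            PySem.Int.toStr ((monos * r) + y) ++ " -" ++
            PySem.Int.toStr ((monos * r) + (x + y)) ++ " 0")))
  placed ++ negated ++ sums

-- ===== PRECONDITION & SPEC =====
def Spec_buildCNF (monos : Int) (rooms : Int) (out : List String) : Prop := out = buildCNF_alt monos rooms
instance (monos : Int) (rooms : Int) (out : List String) : Decidable (Spec_buildCNF monos rooms out) := by unfold Spec_buildCNF; infer_instance

-- ===== CLAIM (what is proved, stated in full; the proofs are below) =====
def Claim_equal_buildCNF : Prop := ∀ (monos : Int) (rooms : Int), Dom_buildCNF monos rooms → Spec_buildCNF monos rooms (buildCNF monos rooms)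

-- ===== LEMMAS AND PROOFS =====

-- string-accumulating fold = join of the mapped pieces
theorem pv_foldl_join (f : Int → String) (l : List Int) (s : String) :
    l.foldl (fun cl r => cl ++ f r) s = s ++ String.join (l.map f) := by
  induction l generalizing s with
  | nil => simp [String.join]
  | cons a t ih => simp [List.foldl_cons, ih, String.join_eq, String.append_assoc]

-- filtering an arithmetic progression by equality with c keeps exactly c (when in range)
theorem pv_filter_range (n : Nat) (a c : Int) :
    (List.map (fun (k : Nat) => a + (k : Int)) (List.range n)).filter (fun z => decide (c = z))
      = if a ≤ c ∧ c < a + n then [c] else [] := by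
  induction n with
  | zero => simp
  | succ n ih =>
    rw [List.range_succ]
    simp only [List.map_append, List.filter_append, ih, List.map_cons, List.map_nil,
      List.filter_cons, List.filter_nil]
    by_cases h : c = a + (n : Int)
    · simp [h]
    · have h2 : (decide (c = a + (n:Int))) = false := by simp [h]
      simp only [h2, Bool.false_eq_true, if_false, List.append_nil]
      split_ifs with p q <;> first | rfl | (exfalso; push_cast at *; omega)

theorem pv_filter_pyRange (a b c : Int) :
    (PySem.List.pyRange a b 1).filter (fun z => decide (c = z))
      = if a ≤ c ∧ c < b then [c] else [] := by
  rw [PySem.List.pyRange_one, pv_filter_range]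
  split_ifs with p q <;> first | rfl | (exfalso; omega)

-- B's filter-then-map as a flatMap of singletons
theorem pv_filter_map_eq_flatMap (p : Int → Bool) (g : Int → String) (l : List Int) :
    (l.filter p).map g = l.flatMap (fun y => if p y then [g y] else []) := by
  induction l with
  | nil => rfl
  | cons a t ih => by_cases h : p a <;> simp [h, ih]

theorem pv_flatMap_congr {l : List Int} {f g : Int → List String}
    (h : ∀ x ∈ l, f x = g x) : l.flatMap f = l.flatMap g := by
  induction l with
  | nil => rfl
  | cons a t ih =>
    simp only [List.flatMap_cons, h a (List.mem_cons_self ..),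
      ih (fun x hx => h x (List.mem_cons_of_mem _ hx))]

-- ===== VERDICT (by name: the statement is the Claim_ definition above) =====
theorem buildCNF_spec : Claim_equal_buildCNF := by
  intro monos rooms _
  unfold Spec_buildCNF buildCNF buildCNF_alt
  dsimp only
  -- sections 1 and 2: append-of-singleton folds become maps, string folds become joins
  rw [PySem.List.foldl_append_singleton_eq_map, PySem.List.foldl_append_singleton_eq_map]
  simp only [pv_foldl_join, String.empty_append, pyL, List.nil_append]
  -- section 3: collapse the z scan into the direct z = x + y check
  have hz : ∀ (cnf : List String) (r x y : Int), 1 ≤ x → x < y →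
      (PySem.List.pyRange (y+1) (monos+1) 1).foldl (fun cnf z =>
        if additiveProperty x y z then
          cnf ++ ["-" ++ PySem.Int.toStr (pyL monos r x) ++ " -" ++
                  PySem.Int.toStr (pyL monos r y) ++ " -" ++
                  PySem.Int.toStr (pyL monos r z) ++ " 0"]
        else cnf) cnf
      = cnf ++ (if (x + y ≤ monos : Bool) then
          ["-" ++ PySem.Int.toStr ((monos * r) + x) ++ " -" ++
           PySem.Int.toStr ((monos * r) + y) ++ " -" ++
           PySem.Int.toStr ((monos * r) + (x + y)) ++ " 0"] else []) := by
    intro cnf r x y hx hxy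
    rw [PySem.List.foldl_append_if]
    have hfc : (PySem.List.pyRange (y+1) (monos+1) 1).filter (additiveProperty x y)
        = (PySem.List.pyRange (y+1) (monos+1) 1).filter (fun z => decide (x + y = z)) :=
      List.filter_congr (fun z _ => by simp [additiveProperty])
    rw [hfc, pv_filter_pyRange]
    by_cases h : x + y ≤ monos
    · have h1 : y + 1 ≤ x + y ∧ x + y < monos + 1 := ⟨by omega, by omega⟩
      simp [h1, h, pyL]
    · have h1 : ¬ (y + 1 ≤ x + y ∧ x + y < monos + 1) := by omega
      simp [h]
  -- remaining: section 3 folds = B's sums flatMap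
  rw [PySem.List.foldl_congr_mem _ _ (fun cnf r =>
    cnf ++ (PySem.List.pyRange 1 (monos-1) 1).flatMap (fun x =>
      (PySem.List.pyRange (x+1) monos 1).flatMap (fun y =>
        if (x + y ≤ monos : Bool) then
          ["-" ++ PySem.Int.toStr ((monos * r) + x) ++ " -" ++
           PySem.Int.toStr ((monos * r) + y) ++ " -" ++
           PySem.Int.toStr ((monos * r) + (x + y)) ++ " 0"] else [])))]
  · rw [PySem.List.foldl_append_eq_flatMap]
    simp only [List.append_assoc]
    congr 1
    congr 1
    refine pv_flatMap_congr (fun r _ => ?_)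
    refine pv_flatMap_congr (fun x _ => ?_)
    rw [pv_filter_map_eq_flatMap]
  · intro cnf r _
    rw [PySem.List.foldl_congr_mem _ _ (fun cnf x =>
      cnf ++ (PySem.List.pyRange (x+1) monos 1).flatMap (fun y =>
        if (x + y ≤ monos : Bool) then
          ["-" ++ PySem.Int.toStr ((monos * r) + x) ++ " -" ++
           PySem.Int.toStr ((monos * r) + y) ++ " -" ++
           PySem.Int.toStr ((monos * r) + (x + y)) ++ " 0"] else [])),
      PySem.List.foldl_append_eq_flatMap]
    intro cnf x hxmem
    have hx := (PySem.List.mem_pyRange_one).1 hxmem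
    rw [PySem.List.foldl_congr_mem _ _ (fun cnf y =>
      cnf ++ (if (x + y ≤ monos : Bool) then
          ["-" ++ PySem.Int.toStr ((monos * r) + x) ++ " -" ++
           PySem.Int.toStr ((monos * r) + y) ++ " -" ++
           PySem.Int.toStr ((monos * r) + (x + y)) ++ " 0"] else [])),
      PySem.List.foldl_append_eq_flatMap]
    intro cnf y hymem
    have hy := (PySem.List.mem_pyRange_one).1 hymem
    exact hz cnf r x y (by omega) (by omega)
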